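-- pv_equiv track=rewrite | github.com/mikkolalab/MLLT3-isoforms | manual_read_assignment_to_isoforms.py | process_CIGAR
-- ===== SOURCE A (Python) =====
-- def process_CIGAR( gPOS, cigar):
--     block_curr = 0
--     blocks = []
--
--     for (ctype, length) in cigar:
--         if ctype in (0, 7, 8):   # M,=,X
--             block_curr += length
--         elif ctype == 2: #D
--             block_curr += length
--         elif ctype == 3: #N
--             blocks.append((gPOS, gPOS + block_curr))
--             gPOS += (block_curr + length)
--             block_curr = 0
--
--     blocks.append((gPOS, gPOS + block_curr))
--     return blocks
-- ===== SOURCE B (Python) =====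
-- def process_CIGAR(gPOS, cigar):
--     # Phase 1: split the CIGAR at N ops into segment block-lengths and the
--     # intervening N gap lengths (always len(seglens) == len(gaps) + 1).
--     seglens = [0]
--     gaps = []
--     for (ctype, length) in cigar:
--         if ctype == 3:
--             gaps.append(length)
--             seglens.append(0)
--         elif ctype in (0, 7, 8, 2):
--             seglens[-1] += length
--     # Phase 2: accumulate genomic positions over the segments.
--     blocks = []
--     start = gPOS
--     for seg, gap in zip(seglens, gaps + [0]):
--         blocks.append((start, start + seg))
--         start += seg + gap
--     return blocks
-- ===== Notes on version B (the rewrite author's own statement) =====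
-- stated objective: alternative
-- what changed: Replaces A's single inline emit-as-you-go loop by a two-phase decomposition: first split the CIGAR at N ops into segment block-lengths plus gap lengths, then a separate positional fold turns that intermediate structure into (start, end) blocks.
import Mathlib
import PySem

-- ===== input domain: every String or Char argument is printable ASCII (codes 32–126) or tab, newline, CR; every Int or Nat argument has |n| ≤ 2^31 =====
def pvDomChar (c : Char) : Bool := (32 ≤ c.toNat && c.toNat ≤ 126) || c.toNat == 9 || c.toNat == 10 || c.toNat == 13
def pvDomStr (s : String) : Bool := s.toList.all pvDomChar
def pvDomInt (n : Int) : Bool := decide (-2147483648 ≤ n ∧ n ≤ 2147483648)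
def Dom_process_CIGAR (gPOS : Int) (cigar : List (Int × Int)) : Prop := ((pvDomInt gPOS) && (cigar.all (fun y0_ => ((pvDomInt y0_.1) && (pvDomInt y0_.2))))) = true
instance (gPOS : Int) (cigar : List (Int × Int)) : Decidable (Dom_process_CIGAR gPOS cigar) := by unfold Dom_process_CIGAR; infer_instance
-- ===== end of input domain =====

-- B is an equal-cost alternative decomposition (segment/gap split, then a positional fold); no speed claim.

-- ===== PORT A =====
-- A's single loop over the CIGAR, state (gPOS, block_curr, blocks), then the final flush append.
def process_CIGAR (gPOS : Int) (cigar : List (Int × Int)) : List (Int × Int) :=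
  let st := cigar.foldl
    (fun (st : Int × Int × List (Int × Int)) (op : Int × Int) =>
      let gP := st.1
      let block_curr := st.2.1
      let blocks := st.2.2
      let ctype := op.1
      let length := op.2
      if ctype = 0 ∨ ctype = 7 ∨ ctype = 8 then (gP, block_curr + length, blocks)
      else if ctype = 2 then (gP, block_curr + length, blocks)
      else if ctype = 3 then (gP + (block_curr + length), 0, blocks ++ [(gP, gP + block_curr)])
      else st)
    (gPOS, 0, [])
  st.2.2 ++ [(st.1, st.1 + st.2.1)]

-- ===== PORT B =====
-- Phase 1 of Source B: split the CIGAR at N ops into segment block-lengths and gap lengths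
-- (the Python loop appends at the back and bumps seglens[-1]; as structural recursion from
-- the front, the current op acts on the head of the result for the rest — same lists).
def pcSegSplit : List (Int × Int) → List Int × List Int
  | [] => ([0], [])
  | (c, l) :: rest =>
    let sg := pcSegSplit rest
    if c = 3 then (0 :: sg.1, l :: sg.2)
    else if c = 0 ∨ c = 7 ∨ c = 8 ∨ c = 2 then
      match sg.1 with
      | [] => ([l], sg.2)          -- unreachable: pcSegSplit never returns an empty first list
      | s :: ss => ((s + l) :: ss, sg.2)
    else sg

-- Phase 2 of Source B: the positional fold over zip(seglens, gaps + [0]).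
def pcEmit : List (Int × Int) → Int → List (Int × Int)
  | [], _ => []
  | (seg, gap) :: rest, start => (start, start + seg) :: pcEmit rest (start + seg + gap)

def process_CIGAR_alt (gPOS : Int) (cigar : List (Int × Int)) : List (Int × Int) :=
  let sg := pcSegSplit cigar
  pcEmit (sg.1.zip (sg.2 ++ [0])) gPOS

-- ===== PRECONDITION & SPEC =====
def Spec_process_CIGAR (gPOS : Int) (cigar : List (Int × Int)) (out : List (Int × Int)) : Prop := out = process_CIGAR_alt gPOS cigar
instance (gPOS : Int) (cigar : List (Int × Int)) (out : List (Int × Int)) : Decidable (Spec_process_CIGAR gPOS cigar out) := by unfold Spec_process_CIGAR; infer_instance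

-- ===== CLAIM (what is proved, stated in full; the proofs are below) =====
def Claim_equal_process_CIGAR : Prop := ∀ (gPOS : Int) (cigar : List (Int × Int)), Dom_process_CIGAR gPOS cigar → Spec_process_CIGAR gPOS cigar (process_CIGAR gPOS cigar)

-- ===== LEMMAS AND PROOFS =====

-- A's loop written as plain recursion emitting blocks in order.
def pcLoopA : List (Int × Int) → Int → Int → List (Int × Int)
  | [], gP, bc => [(gP, gP + bc)]
  | (c, l) :: rest, gP, bc =>
    if c = 0 ∨ c = 7 ∨ c = 8 then pcLoopA rest gP (bc + l)
    else if c = 2 then pcLoopA rest gP (bc + l)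
    else if c = 3 then (gP, gP + bc) :: pcLoopA rest (gP + (bc + l)) 0
    else pcLoopA rest gP bc

lemma pcSegSplit_fst_ne_nil (cigar : List (Int × Int)) : (pcSegSplit cigar).1 ≠ [] := by
  induction cigar with
  | nil => simp [pcSegSplit]
  | cons hd tl ih =>
    obtain ⟨c, l⟩ := hd
    simp only [pcSegSplit]
    split_ifs with h1 h2
    · simp
    · rcases hs : (pcSegSplit tl).1 with _ | ⟨s, ss⟩
      · exact absurd hs ih
      · simp
    · exact ih

-- The foldl form of A equals the recursive form, up to the accumulated prefix.
lemma pcFoldA_eq_loopA (cigar : List (Int × Int)) :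
    ∀ (gP bc : Int) (blocks : List (Int × Int)),
    (let st := cigar.foldl
      (fun (st : Int × Int × List (Int × Int)) (op : Int × Int) =>
        let gP := st.1
        let block_curr := st.2.1
        let blocks := st.2.2
        let ctype := op.1
        let length := op.2
        if ctype = 0 ∨ ctype = 7 ∨ ctype = 8 then (gP, block_curr + length, blocks)
        else if ctype = 2 then (gP, block_curr + length, blocks)
        else if ctype = 3 then (gP + (block_curr + length), 0, blocks ++ [(gP, gP + block_curr)])
        else st)
      (gP, bc, blocks)
     st.2.2 ++ [(st.1, st.1 + st.2.1)]) = blocks ++ pcLoopA cigar gP bc := by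
  induction cigar with
  | nil => intro gP bc blocks; simp [pcLoopA]
  | cons hd tl ih =>
    intro gP bc blocks
    obtain ⟨c, l⟩ := hd
    simp only [List.foldl_cons, pcLoopA]
    split_ifs with h1 h2 h3
    · exact ih gP (bc + l) blocks
    · exact ih gP (bc + l) blocks
    · rw [ih (gP + (bc + l)) 0 (blocks ++ [(gP, gP + bc)])]
      simp
    · exact ih gP bc blocks

-- The main correspondence: A's loop equals B's emit over the split, with the pending
-- block length bc added to the first segment.
lemma pcLoopA_eq_emit (cigar : List (Int × Int)) :
    ∀ (gP bc : Int) (s : Int) (ss : List Int),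
    (pcSegSplit cigar).1 = s :: ss →
    pcLoopA cigar gP bc = pcEmit (((bc + s) :: ss).zip ((pcSegSplit cigar).2 ++ [0])) gP := by
  induction cigar with
  | nil =>
    intro gP bc s ss h
    simp [pcSegSplit] at h
    simp [h.1, h.2, pcLoopA, pcSegSplit, pcEmit]
  | cons hd tl ih =>
    intro gP bc s ss h
    obtain ⟨c, l⟩ := hd
    rcases hs : (pcSegSplit tl).1 with _ | ⟨s', ss'⟩
    · exact absurd hs (pcSegSplit_fst_ne_nil tl)
    simp only [pcSegSplit, hs] at h ⊢
    by_cases h3 : c = 3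
    · subst h3
      rw [if_pos rfl] at h
      simp only [List.cons.injEq] at h
      obtain ⟨h1, h2⟩ := h
      subst h1; subst h2
      have ihx := ih (gP + (bc + l)) 0 s' ss' hs
      rw [zero_add] at ihx
      simp only [pcLoopA]
      norm_num
      rw [ihx, show gP + (bc + l) = gP + bc + l by ring]
      simp only [pcEmit]
    · by_cases hm : c = 0 ∨ c = 7 ∨ c = 8 ∨ c = 2
      · rw [if_neg h3, if_pos hm] at h ⊢
        simp only [List.cons.injEq] at h
        obtain ⟨h1, h2⟩ := h
        subst h1; subst h2
        have hL : pcLoopA ((c, l) :: tl) gP bc = pcLoopA tl gP (bc + l) := by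
          rcases hm with h | h | h | h <;> simp [pcLoopA, h]
        rw [hL, ih gP (bc + l) s' ss' hs]
        have harith : bc + l + s' = bc + (s' + l) := by ring
        rw [harith]
      · rw [if_neg h3, if_neg hm] at h ⊢
        rw [hs] at h
        simp only [List.cons.injEq] at h
        obtain ⟨h1, h2⟩ := h
        subst h1; subst h2
        have hL : pcLoopA ((c, l) :: tl) gP bc = pcLoopA tl gP bc := by
          have h0 : ¬ (c = 0 ∨ c = 7 ∨ c = 8) := by tauto
          have h2c : c ≠ 2 := by tauto
          simp [pcLoopA, h0, h2c, h3]
        rw [hL, ih gP bc s' ss' hs]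

-- ===== VERDICT (by name: the statement is the Claim_ definition above) =====
theorem process_CIGAR_spec : Claim_equal_process_CIGAR := by
  intro gPOS cigar _
  unfold Spec_process_CIGAR process_CIGAR process_CIGAR_alt
  rcases hs : (pcSegSplit cigar).1 with _ | ⟨s, ss⟩
  · exact absurd hs (pcSegSplit_fst_ne_nil cigar)
  rw [pcFoldA_eq_loopA cigar gPOS 0 [], pcLoopA_eq_emit cigar gPOS 0 s ss hs]
  simp [hs]
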